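-- pv_equiv track=rewrite | github.com/50shades0fGraei/cyclic-cypher-compressor | core/signature_archiver.py | generate_shuffled_alphabets
-- ===== SOURCE A (Python) =====
-- def generate_shuffled_alphabets(sovereign_variables):
--     """Generate shuffled character alphabets from sovereign variables."""
--     base_alphabet = 'abcdefghijklmnopqrstuvwxyz'
--     alphabets = []
--     for i, val in enumerate(sovereign_variables):
--         chars = list(base_alphabet)
--         # Shuffle based on sovereign variable
--         for _ in range(val % 10):
--             chars = chars[1:] + chars[:1]
--         alphabets.append(''.join(chars))
--     return alphabets
-- ===== SOURCE B (Python) =====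
-- def generate_shuffled_alphabets(sovereign_variables):
--     """Generate shuffled character alphabets from sovereign variables."""
--     base_alphabet = 'abcdefghijklmnopqrstuvwxyz'
--     return [base_alphabet[val % 10:] + base_alphabet[:val % 10]
--             for val in sovereign_variables]
-- ===== Notes on version B (the rewrite author's own statement) =====
-- stated objective: simpler
-- what changed: Replaces the inner loop that rotates the alphabet one character at a time (val % 10 single-step rotations) with a closed-form slice base[k:] + base[:k] where k = val % 10, inside a single comprehension.
import Mathlib
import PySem

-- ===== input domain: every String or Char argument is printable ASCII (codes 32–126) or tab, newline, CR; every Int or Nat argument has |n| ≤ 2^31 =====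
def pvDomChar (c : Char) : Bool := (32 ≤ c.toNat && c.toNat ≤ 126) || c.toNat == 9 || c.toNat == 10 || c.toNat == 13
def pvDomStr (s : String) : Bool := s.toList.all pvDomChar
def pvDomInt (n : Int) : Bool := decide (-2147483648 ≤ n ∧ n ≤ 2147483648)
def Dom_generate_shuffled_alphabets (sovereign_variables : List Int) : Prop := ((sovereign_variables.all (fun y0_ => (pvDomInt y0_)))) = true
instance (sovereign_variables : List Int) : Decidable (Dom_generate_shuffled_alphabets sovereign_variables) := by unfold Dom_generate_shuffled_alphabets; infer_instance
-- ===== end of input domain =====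

-- B replaces the inner one-step rotation loop with the closed-form slice base[k:] + base[:k], k = val % 10 (simpler; small constant-factor win).
-- ===== PORT A =====
-- chars[1:] + chars[:1]
def gsaRot (cs : List Char) : List Char :=
  PySem.List.slice cs (some 1) none ++ PySem.List.slice cs none (some 1)

def generate_shuffled_alphabets (sovereign_variables : List Int) : List String :=
  let base_alphabet := "abcdefghijklmnopqrstuvwxyz".toList
  (PySem.List.enumerate sovereign_variables 0).foldl
    (fun alphabets iv =>
      let chars :=
        (PySem.List.pyRange 0 (PySem.Int.mod iv.2 10) 1).foldl
          (fun cs _ => gsaRot cs) base_alphabet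
      alphabets ++ [String.ofList chars]) []

-- ===== PORT B =====
def generate_shuffled_alphabets_alt (sovereign_variables : List Int) : List String :=
  let base_alphabet := "abcdefghijklmnopqrstuvwxyz".toList
  sovereign_variables.map (fun val =>
    String.ofList
      (PySem.List.slice base_alphabet (some (PySem.Int.mod val 10)) none ++
       PySem.List.slice base_alphabet none (some (PySem.Int.mod val 10))))

-- ===== PRECONDITION & SPEC =====
def Spec_generate_shuffled_alphabets (sovereign_variables : List Int) (out : List String) : Prop := out = generate_shuffled_alphabets_alt sovereign_variables
instance (sovereign_variables : List Int) (out : List String) : Decidable (Spec_generate_shuffled_alphabets sovereign_variables out) := by unfold Spec_generate_shuffled_alphabets; infer_instance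

-- ===== CLAIM (what is proved, stated in full; the proofs are below) =====
def Claim_equal_generate_shuffled_alphabets : Prop := ∀ (sovereign_variables : List Int), Dom_generate_shuffled_alphabets sovereign_variables → Spec_generate_shuffled_alphabets sovereign_variables (generate_shuffled_alphabets sovereign_variables)

-- ===== LEMMAS AND PROOFS =====

-- the per-element value: ten rotation steps collapse to the slice form (m = val % 10 is one of 0..9)
theorem gsa_inner (val : Int) :
    (PySem.List.pyRange 0 (PySem.Int.mod val 10) 1).foldl
        (fun cs _ => gsaRot cs) "abcdefghijklmnopqrstuvwxyz".toList =
      PySem.List.slice "abcdefghijklmnopqrstuvwxyz".toList (some (PySem.Int.mod val 10)) none ++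
      PySem.List.slice "abcdefghijklmnopqrstuvwxyz".toList none (some (PySem.Int.mod val 10)) := by
  have h0 : 0 ≤ PySem.Int.mod val 10 := PySem.Int.mod_nonneg val (by omega)
  have h1 : PySem.Int.mod val 10 < 10 := PySem.Int.mod_lt val (by omega)
  set m := PySem.Int.mod val 10 with hm
  clear_value m
  interval_cases m <;> decide

theorem gsa_fold (svs : List Int) (s : Int) (acc : List String) :
    (PySem.List.enumerate svs s).foldl
        (fun alphabets iv =>
          let chars :=
            (PySem.List.pyRange 0 (PySem.Int.mod iv.2 10) 1).foldl
              (fun cs _ => gsaRot cs) "abcdefghijklmnopqrstuvwxyz".toList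
          alphabets ++ [String.ofList chars]) acc =
      acc ++ svs.map (fun val =>
        String.ofList
          (PySem.List.slice "abcdefghijklmnopqrstuvwxyz".toList (some (PySem.Int.mod val 10)) none ++
           PySem.List.slice "abcdefghijklmnopqrstuvwxyz".toList none (some (PySem.Int.mod val 10)))) := by
  induction svs generalizing s acc with
  | nil => simp [PySem.List.enumerate_nil]
  | cons x xs ih =>
      rw [PySem.List.enumerate_cons]
      simp only [List.foldl_cons, List.map_cons]
      rw [ih, gsa_inner]
      simp

-- ===== VERDICT (by name: the statement is the Claim_ definition above) =====
theorem generate_shuffled_alphabets_spec : Claim_equal_generate_shuffled_alphabets := by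
  intro svs _
  show generate_shuffled_alphabets svs = generate_shuffled_alphabets_alt svs
  exact (gsa_fold svs 0 []).trans (List.nil_append _)
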